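-- pv_equiv track=rewrite | github.com/nicomni/thesis-code | src/geomdiff/utils.py | myers_length_of_shortest_edit_script
-- ===== SOURCE A (Python) =====
-- def myers_length_of_shortest_edit_script(a, b):
--     """Calculate the length of shortest edit script
--
--     This is the original algorithm as described on page 6 of
--     "An O(N) Difference Algorithm and Its Variations" by Eugene W. Myers
--     Hei
--
--     """
--     N = len(a)
--     M = len(b)
--     MAX = N + M
--     v = [0] * (2 * MAX + 2)
--     for D in range(0, MAX + 1):
--         # Find all D-paths, using breadth first search.
--         # A D-path is a path in the edit graph that consists of exactly D
--         # non-diagonal, i.e., vertical or horizontal, edges.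
--         # Return early when the (N,M) point in the edit graph is reached.
--         for k in range(-D, D + 1, 2):
--             # Find the end point of the furthest reaching D-path in diagonal k
--
--             # If diagonal k is on the lower k-bound (-D) then there exists no
--             # value for v[k-1]. Hence, we allow for this.
--             # Also,
--             # if k is on the upper bound there are no value for v[k+1]. We
--             # guard against this, and the case where the furthest reaching
--             # D-path in the diagonal above is shorter than the path form the
--             # diagonal above.
--             if k == -D or (k != D and v[k - 1] < v[k + 1]):
--                 # continue search path from the same x-index as
--                 # the furthest reaching path in diagonal above
--                 x = v[k + 1]
--             else:
--                 # Otherwise k==D or the x index of the furthest reaching D-path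
--                 # on the diagonal below is greater or equal to the furthest reaching
--                 # path on the diagonal above. The result is that we start from the furthest
--                 # reaching point below and follow a horizontal edge by increasing x.
--                 x = v[k - 1] + 1
--             y = x - k
--             # Follow the snake (if any) while not reaching the lower or rightmost bound
--             while x < N and y < M and a[x] == b[y]:
--                 x, y = x + 1, y + 1
--             # record the new row index of the furthest reaching path in diagonal k
--             v[k] = x
--             if x >= N and y >= M:
--                 return D
--     raise RuntimeError("Should not reach this point")
-- ===== SOURCE B (Python) =====
-- def myers_length_of_shortest_edit_script(a, b):
--     """Length of the shortest insert/delete edit script, computed by the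
--     classic dynamic program over suffixes: row[j] = edit distance between
--     the current suffix of a and b[j:]."""
--     m = len(b)
--     row = list(range(m, -1, -1))  # distance of "" vs b[j:] is m - j
--     for x in reversed(a):
--         new = [0] * (m + 1)
--         new[m] = row[m] + 1
--         for j in range(m - 1, -1, -1):
--             new[j] = row[j + 1] if x == b[j] else 1 + min(row[j], new[j + 1])
--         row = new
--     return row[0]
-- ===== Notes on version B (the rewrite author's own statement) =====
-- stated objective: alternative
-- what changed: Replaced Myers' greedy furthest-reaching-diagonal search over a V array by the classic quadratic edit-distance dynamic program with one rolling row over suffixes, using the identity that the shortest insert/delete edit script length equals the Levenshtein-without-substitution distance.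
import Mathlib
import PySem

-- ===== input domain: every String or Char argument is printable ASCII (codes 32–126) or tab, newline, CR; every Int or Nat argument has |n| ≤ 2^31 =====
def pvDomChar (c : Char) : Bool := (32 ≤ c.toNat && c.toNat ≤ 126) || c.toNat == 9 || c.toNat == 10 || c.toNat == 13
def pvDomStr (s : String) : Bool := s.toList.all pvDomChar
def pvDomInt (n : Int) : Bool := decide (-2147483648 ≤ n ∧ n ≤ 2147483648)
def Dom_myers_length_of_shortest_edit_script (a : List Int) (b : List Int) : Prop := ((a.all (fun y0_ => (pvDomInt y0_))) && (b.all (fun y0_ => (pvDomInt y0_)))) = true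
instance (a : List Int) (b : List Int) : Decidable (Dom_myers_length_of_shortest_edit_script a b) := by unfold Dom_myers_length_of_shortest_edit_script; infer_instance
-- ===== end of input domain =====

-- B replaces Myers' furthest-reaching-diagonal search by the classic rolling-row
-- edit-distance dynamic program (alternative algorithm, same exact value).

-- ===== PORT A =====
-- the snake: `while x < N and y < M and a[x] == b[y]: x, y = x+1, y+1` (y = x - k)
def pvSnakeEq (a b : List Int) (k x : Int) : Bool :=
  match PySem.List.pyGet? a x, PySem.List.pyGet? b (x - k) with
  | some u, some w => u == w
  | _, _ => false

def pvSnake (a b : List Int) (k x : Int) : Int :=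
  if h : x < (a.length : Int) ∧ x - k < (b.length : Int) ∧ pvSnakeEq a b k x = true
  then pvSnake a b k (x + 1) else x
termination_by ((a.length : Int) - x).toNat
decreasing_by omega

-- one iteration of the inner `for k` body, up to the end of the snake
def pvBody (a b : List Int) (D k : Int) (v : List Int) : Int :=
  let x := if k = -D ∨ (k ≠ D ∧ PySem.List.pyGetD v (k-1) 0 < PySem.List.pyGetD v (k+1) 0)
           then PySem.List.pyGetD v (k+1) 0
           else PySem.List.pyGetD v (k-1) 0 + 1
  pvSnake a b k x

-- the inner `for k in range(-D, D+1, 2)` loop with its early `return D`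
def pvInner (a b : List Int) (D : Int) : List Int → List Int → (List Int) ⊕ Int
  | [], v => .inl v
  | k :: ks, v =>
    let x := pvBody a b D k v
    let v' := PySem.List.pySetD v k x
    if (a.length : Int) ≤ x ∧ (b.length : Int) ≤ x - k
    then .inr D
    else pvInner a b D ks v'

-- the outer `for D in range(0, MAX+1)` loop; [] = the unreachable `raise RuntimeError`
def pvOuter (a b : List Int) : List Int → List Int → Int
  | [], _ => -1
  | D :: Ds, v =>
    match pvInner a b D (PySem.List.pyRange (-D) (D + 1) 2) v with
    | .inr d => d
    | .inl v' => pvOuter a b Ds v'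

def myers_length_of_shortest_edit_script (a : List Int) (b : List Int) : Int :=
  pvOuter a b (PySem.List.pyRange 0 ((a.length : Int) + (b.length : Int) + 1) 1)
    (List.replicate (2 * (a.length + b.length) + 2) 0)

-- ===== PORT B =====
-- `row = list(range(m, -1, -1))` : the DP row for the empty suffix of a
def pvBaseRow : List Int → List Int
  | [] => [0]
  | _ :: t => ((t.length : Int) + 1) :: pvBaseRow t

-- the inner `for j in range(m-1, -1, -1)` pass building `new` right-to-left
def pvStepRow (x : Int) : List Int → List Int → List Int
  | y :: bs, r0 :: r1 :: rest =>
    let tl := pvStepRow x bs (r1 :: rest)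
    (if x = y then r1 else 1 + min r0 (tl.headD 0)) :: tl
  | _, row => row.map (· + 1)

def myers_length_of_shortest_edit_script_alt (a : List Int) (b : List Int) : Int :=
  (a.foldr (fun x row => pvStepRow x b row) (pvBaseRow b)).headD 0

-- ===== PRECONDITION & SPEC =====
def Spec_myers_length_of_shortest_edit_script (a : List Int) (b : List Int) (out : Int) : Prop := out = myers_length_of_shortest_edit_script_alt a b
instance (a : List Int) (b : List Int) (out : Int) : Decidable (Spec_myers_length_of_shortest_edit_script a b out) := by unfold Spec_myers_length_of_shortest_edit_script; infer_instance

-- ===== CLAIM (what is proved, stated in full; the proofs are below) =====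
def Claim_equal_myers_length_of_shortest_edit_script : Prop := ∀ (a : List Int) (b : List Int), Dom_myers_length_of_shortest_edit_script a b → Spec_myers_length_of_shortest_edit_script a b (myers_length_of_shortest_edit_script a b)

-- ===== LEMMAS AND PROOFS =====

-- The reference function: edit distance (insertions/deletions only).
def pvEd : List Int → List Int → Int
  | [], v => v.length
  | u, [] => u.length
  | x :: u, y :: v => if x = y then pvEd u v else 1 + min (pvEd u (y :: v)) (pvEd (x :: u) v)
termination_by u v => u.length + v.length

theorem pvEd_nil_left (v : List Int) : pvEd [] v = v.length := by cases v <;> simp [pvEd]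

theorem pvEd_nil_right (u : List Int) : pvEd u [] = u.length := by cases u <;> simp [pvEd]

-- common-subsequence helpers
theorem pvSub_cons_eq {s u v : List Int} (x : Int)
    (hu : s.Sublist (x :: u)) (hv : s.Sublist (x :: v)) :
    ∃ t : List Int, t.Sublist u ∧ t.Sublist v ∧ s.length ≤ t.length + 1 := by
  match s with
  | [] => exact ⟨[], by simp, by simp, by simp⟩
  | w :: s' =>
    have htu : s'.Sublist u := by
      rcases List.sublist_cons_iff.mp hu with h | ⟨r, hr, hr'⟩
      · exact ((List.sublist_cons_self w s').trans h)
      · cases hr; exact hr'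
    have htv : s'.Sublist v := by
      rcases List.sublist_cons_iff.mp hv with h | ⟨r, hr, hr'⟩
      · exact ((List.sublist_cons_self w s').trans h)
      · cases hr; exact hr'
    exact ⟨s', htu, htv, by simp⟩

theorem pvSub_cons_ne {s u v : List Int} {x y : Int} (hxy : x ≠ y)
    (hu : s.Sublist (x :: u)) (hv : s.Sublist (y :: v)) :
    s.Sublist u ∨ s.Sublist v := by
  match s with
  | [] => exact Or.inl (by simp)
  | w :: s' =>
    rcases List.sublist_cons_iff.mp hu with h | ⟨r, hr, hr'⟩
    · exact Or.inl h
    · rcases List.sublist_cons_iff.mp hv with h2 | ⟨r2, hr2, hr2'⟩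
      · exact Or.inr h2
      · cases hr; cases hr2; simp_all

-- ed is at most any common-subsequence alignment cost
theorem pvEd_le (u v : List Int) : ∀ s : List Int, s.Sublist u → s.Sublist v →
    pvEd u v ≤ (u.length : Int) + v.length - 2 * s.length := by
  fun_induction pvEd with
  | case1 v => intro s hu hv
               have : s = [] := List.sublist_nil.mp hu
               subst this; simp [pvEd_nil_left]
  | case2 u hne => intro s hu hv
                   have : s = [] := List.sublist_nil.mp hv
                   subst this; simp [pvEd_nil_right]
  | case3 u y v ih =>
    intro s hu hv
    obtain ⟨t, htu, htv, hlen⟩ := pvSub_cons_eq y hu hv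
    have := ih t htu htv
    simp only [List.length_cons, pvEd, if_pos rfl]
    push_cast at *
    omega
  | case4 x u y v hne ih1 ih2 =>
    intro s hu hv
    have hb : pvEd (x :: u) (y :: v) = 1 + min (pvEd u (y :: v)) (pvEd (x :: u) v) := by
      rw [pvEd]; simp [hne]
    have hm1 := min_le_left (pvEd u (y :: v)) (pvEd (x :: u) v)
    have hm2 := min_le_right (pvEd u (y :: v)) (pvEd (x :: u) v)
    rcases pvSub_cons_ne hne hu hv with h | h
    · have := ih1 s h hv
      simp only [List.length_cons] at *
      push_cast at *
      omega
    · have := ih2 s hu h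
      simp only [List.length_cons] at *
      push_cast at *
      omega

-- ed is attained by some common subsequence
theorem pvEd_wit (u v : List Int) : ∃ s : List Int, s.Sublist u ∧ s.Sublist v ∧
    pvEd u v = (u.length : Int) + v.length - 2 * s.length := by
  fun_induction pvEd with
  | case1 v => exact ⟨[], by simp, by simp, by simp [pvEd_nil_left]⟩
  | case2 u hne => exact ⟨[], by simp, by simp, by simp [pvEd_nil_right]⟩
  | case3 u y v ih =>
    obtain ⟨s, hu, hv, he⟩ := ih
    refine ⟨y :: s, List.cons_sublist_cons.mpr hu, List.cons_sublist_cons.mpr hv, ?_⟩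
    simp only [pvEd, if_pos rfl, List.length_cons]
    push_cast
    omega
  | case4 x u y v hne ih1 ih2 =>
    have hb : pvEd (x :: u) (y :: v) = 1 + min (pvEd u (y :: v)) (pvEd (x :: u) v) := by
      rw [pvEd]; simp [hne]
    by_cases hle : pvEd u (y :: v) ≤ pvEd (x :: u) v
    · obtain ⟨s, hu, hv, he⟩ := ih1
      have hmin : min (pvEd u (y :: v)) (pvEd (x :: u) v) = pvEd u (y :: v) := min_eq_left hle
      refine ⟨s, hu.trans (List.sublist_cons_self x u), hv, ?_⟩
      simp only [List.length_cons] at *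
      push_cast at *
      omega
    · obtain ⟨s, hu, hv, he⟩ := ih2
      have hmin : min (pvEd u (y :: v)) (pvEd (x :: u) v) = pvEd (x :: u) v :=
        min_eq_right (by omega)
      refine ⟨s, hu, hv.trans (List.sublist_cons_self y v), ?_⟩
      simp only [List.length_cons] at *
      push_cast at *
      omega

theorem pvEd_nonneg (u v : List Int) : 0 ≤ pvEd u v := by
  obtain ⟨s, hu, hv, he⟩ := pvEd_wit u v
  have h1 := hu.length_le; have h2 := hv.length_le; omega

theorem pvEd_le_sum (u v : List Int) : pvEd u v ≤ (u.length : Int) + v.length := by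
  have := pvEd_le u v [] (by simp) (by simp); simpa using this

theorem pvEd_ge_sub (u v : List Int) :
    (u.length : Int) - v.length ≤ pvEd u v ∧ (v.length : Int) - u.length ≤ pvEd u v := by
  obtain ⟨s, hu, hv, he⟩ := pvEd_wit u v
  have h1 := hu.length_le; have h2 := hv.length_le; omega

theorem pvEd_parity (u v : List Int) : ∃ s : Nat, pvEd u v + 2 * s = (u.length : Int) + v.length := by
  obtain ⟨s, hu, hv, he⟩ := pvEd_wit u v
  exact ⟨s.length, by omega⟩

theorem pvEd_rev (u v : List Int) : pvEd u.reverse v.reverse = pvEd u v := by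
  have key : ∀ p q : List Int, pvEd p.reverse q.reverse ≤ pvEd p q := by
    intro p q
    obtain ⟨s, hu, hv, he⟩ := pvEd_wit p q
    have := pvEd_le p.reverse q.reverse s.reverse hu.reverse hv.reverse
    simp only [List.length_reverse] at this
    omega
  have h1 := key u v
  have h2 := key u.reverse v.reverse
  simp only [List.reverse_reverse] at h2
  omega

theorem pvEd_cons_eq (c : Int) (u v : List Int) : pvEd (c :: u) (c :: v) = pvEd u v := by
  rw [pvEd]; simp

theorem pvEd_cons_ne {x y : Int} (u v : List Int) (h : x ≠ y) :
    pvEd (x :: u) (y :: v) = 1 + min (pvEd u (y :: v)) (pvEd (x :: u) v) := by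
  rw [pvEd]; simp [h]

theorem pvEd_ins_left (c : Int) (u v : List Int) : pvEd (c :: u) v ≤ 1 + pvEd u v := by
  obtain ⟨s, hu, hv, he⟩ := pvEd_wit u v
  have := pvEd_le (c :: u) v s (hu.trans (List.sublist_cons_self c u)) hv
  simp only [List.length_cons] at this; omega

theorem pvEd_ins_right (c : Int) (u v : List Int) : pvEd u (c :: v) ≤ 1 + pvEd u v := by
  obtain ⟨s, hu, hv, he⟩ := pvEd_wit u v
  have := pvEd_le u (c :: v) s hu (hv.trans (List.sublist_cons_self c v))
  simp only [List.length_cons] at this; omega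

-- clamped prefix distance and the extended ("beyond the grid edge") distance
def pvDist (a b : List Int) (x y : Int) : Int :=
  pvEd ((a.take x.toNat).reverse) ((b.take y.toNat).reverse)

def pvDistE (a b : List Int) (x y : Int) : Int :=
  pvDist a b x y + max (x - a.length) 0 + max (y - b.length) 0

theorem pvTake_rev_succ (a : List Int) (x : Int) (h0 : 0 ≤ x) (h1 : x < (a.length : Int)) :
    (a.take (x+1).toNat).reverse = a.getD x.toNat 0 :: (a.take x.toNat).reverse := by
  have hn : x.toNat < a.length := by omega
  have h2 : (x+1).toNat = x.toNat + 1 := by omega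
  have h3 : a.getD x.toNat 0 = a[x.toNat] := List.getD_eq_getElem a 0 hn
  have h4 : a.take (x.toNat+1) = a.take x.toNat ++ [a[x.toNat]] := by
    rw [List.take_add_one, List.getElem?_eq_getElem hn]; rfl
  rw [h2, h4, h3, List.reverse_append]; rfl

theorem pvDist_clamp_left (a b : List Int) (x x' y : Int)
    (h : (a.length : Int) ≤ x) (h' : (a.length : Int) ≤ x') :
    pvDist a b x y = pvDist a b x' y := by
  have hx : a.take x.toNat = a := List.take_of_length_le (by omega)
  have hx' : a.take x'.toNat = a := List.take_of_length_le (by omega)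
  unfold pvDist; rw [hx, hx']

theorem pvDist_clamp_right (a b : List Int) (x y y' : Int)
    (h : (b.length : Int) ≤ y) (h' : (b.length : Int) ≤ y') :
    pvDist a b x y = pvDist a b x y' := by
  have hy : b.take y.toNat = b := List.take_of_length_le (by omega)
  have hy' : b.take y'.toNat = b := List.take_of_length_le (by omega)
  unfold pvDist; rw [hy, hy']

theorem pvDist_nonneg (a b : List Int) (x y : Int) : 0 ≤ pvDist a b x y := pvEd_nonneg _ _

theorem pvDistE_nonneg (a b : List Int) (x y : Int) : 0 ≤ pvDistE a b x y := by
  have := pvDist_nonneg a b x y; unfold pvDistE; omega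

theorem pvDistE_h (a b : List Int) (x y : Int) (hx : 0 ≤ x) :
    pvDistE a b (x+1) y ≤ 1 + pvDistE a b x y := by
  by_cases hxa : x < (a.length : Int)
  · have hrw := pvTake_rev_succ a x hx hxa
    have hed : pvDist a b (x+1) y ≤ 1 + pvDist a b x y := by
      unfold pvDist; rw [hrw]; exact pvEd_ins_left _ _ _
    unfold pvDistE; omega
  · have hcl : pvDist a b (x+1) y = pvDist a b x y :=
      pvDist_clamp_left a b (x+1) x y (by omega) (by omega)
    unfold pvDistE; omega

theorem pvDistE_v (a b : List Int) (x y : Int) (hy : 0 ≤ y) :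
    pvDistE a b x (y+1) ≤ 1 + pvDistE a b x y := by
  by_cases hyb : y < (b.length : Int)
  · have hrw := pvTake_rev_succ b y hy hyb
    have hed : pvDist a b x (y+1) ≤ 1 + pvDist a b x y := by
      unfold pvDist; rw [hrw]; exact pvEd_ins_right _ _ _
    unfold pvDistE; omega
  · have hcl : pvDist a b x (y+1) = pvDist a b x y :=
      pvDist_clamp_right a b x (y+1) y (by omega) (by omega)
    unfold pvDistE; omega

theorem pvDistE_snake (a b : List Int) (x y : Int) (hx0 : 0 ≤ x) (hx1 : x < (a.length : Int))
    (hy0 : 0 ≤ y) (hy1 : y < (b.length : Int)) (heq : a.getD x.toNat 0 = b.getD y.toNat 0) :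
    pvDistE a b (x+1) (y+1) = pvDistE a b x y := by
  have hra := pvTake_rev_succ a x hx0 hx1
  have hrb := pvTake_rev_succ b y hy0 hy1
  have hed : pvDist a b (x+1) (y+1) = pvDist a b x y := by
    unfold pvDist; rw [hra, hrb, heq, pvEd_cons_eq]
  unfold pvDistE; omega

theorem pvDistE_hb (a b : List Int) (x y : Int) (hx : (a.length : Int) ≤ x - 1) (hy : 0 ≤ y) :
    pvDistE a b (x-1) y = pvDistE a b x y - 1 := by
  have hcl : pvDist a b (x-1) y = pvDist a b x y :=
    pvDist_clamp_left a b (x-1) x y hx (by omega)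
  have hN : (0:Int) ≤ a.length := by positivity
  unfold pvDistE; omega

theorem pvDistE_vb (a b : List Int) (x y : Int) (hy : (b.length : Int) ≤ y - 1) (hx : 0 ≤ x) :
    pvDistE a b x (y-1) = pvDistE a b x y - 1 := by
  have hcl : pvDist a b x (y-1) = pvDist a b x y :=
    pvDist_clamp_right a b x (y-1) y hy (by omega)
  have hM : (0:Int) ≤ b.length := by positivity
  unfold pvDistE; omega

theorem pvDistE_neq (a b : List Int) (x y : Int) (hx0 : 0 < x) (hx1 : x ≤ (a.length : Int))
    (hy0 : 0 < y) (hy1 : y ≤ (b.length : Int))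
    (hne : a.getD (x-1).toNat 0 ≠ b.getD (y-1).toNat 0) :
    pvDistE a b x y = 1 + min (pvDistE a b (x-1) y) (pvDistE a b x (y-1)) := by
  have hra := pvTake_rev_succ a (x-1) (by omega) (by omega)
  have hrb := pvTake_rev_succ b (y-1) (by omega) (by omega)
  have hx' : x - 1 + 1 = x := by omega
  have hy' : y - 1 + 1 = y := by omega
  rw [hx'] at hra; rw [hy'] at hrb
  have hed : pvDist a b x y =
      1 + min (pvDist a b (x-1) y) (pvDist a b x (y-1)) := by
    unfold pvDist; rw [hra, hrb, pvEd_cons_ne _ _ hne, ← hrb, ← hra]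
  unfold pvDistE
  have hm1 := min_le_left (pvDist a b (x-1) y) (pvDist a b x (y-1))
  have hm2 := min_le_right (pvDist a b (x-1) y) (pvDist a b x (y-1))
  have hm3 : min (pvDist a b (x-1) y) (pvDist a b x (y-1)) = pvDist a b (x-1) y ∨
      min (pvDist a b (x-1) y) (pvDist a b x (y-1)) = pvDist a b x (y-1) :=
    min_choice _ _
  omega

theorem pvDistE_zero_left (a b : List Int) (y : Int) (hy : 0 ≤ y) : pvDistE a b 0 y = y := by
  have hd : pvDist a b 0 y = ((b.take y.toNat).length : Int) := by
    unfold pvDist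
    simp [pvEd_nil_left]
  have hl : ((b.take y.toNat).length : Int) = min y (b.length) := by
    simp [List.length_take]; omega
  have hN : (0:Int) ≤ a.length := by positivity
  unfold pvDistE; omega

theorem pvDistE_zero_right (a b : List Int) (x : Int) (hx : 0 ≤ x) : pvDistE a b x 0 = x := by
  have hd : pvDist a b x 0 = ((a.take x.toNat).length : Int) := by
    unfold pvDist
    simp [pvEd_nil_right]
  have hl : ((a.take x.toNat).length : Int) = min x (a.length) := by
    simp [List.length_take]; omega
  have hM : (0:Int) ≤ b.length := by positivity
  unfold pvDistE; omega

theorem pvDistE_lb (a b : List Int) (x y : Int) (hx : 0 ≤ x) (hy : 0 ≤ y) :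
    x - y ≤ pvDistE a b x y ∧ y - x ≤ pvDistE a b x y := by
  have h := pvEd_ge_sub ((a.take x.toNat).reverse) ((b.take y.toNat).reverse)
  have l1 : (((a.take x.toNat).reverse).length : Int) = min x (a.length) := by
    simp [List.length_take]; omega
  have l2 : (((b.take y.toNat).reverse).length : Int) = min y (b.length) := by
    simp [List.length_take]; omega
  have hdef : pvDist a b x y = pvEd ((a.take x.toNat).reverse) ((b.take y.toNat).reverse) := rfl
  unfold pvDistE
  omega

theorem pvDistE_ge_pen (a b : List Int) (x y : Int) : x - (a.length : Int) ≤ pvDistE a b x y := by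
  have := pvDist_nonneg a b x y; unfold pvDistE; omega

theorem pvDistE_NM (a b : List Int) : pvDistE a b a.length b.length = pvEd a b := by
  unfold pvDistE pvDist
  simp [List.take_of_length_le (le_refl _), pvEd_rev]

theorem pvDistE_corner (a b : List Int) (x y : Int) (hx : (a.length : Int) ≤ x) (hy : (b.length : Int) ≤ y) :
    pvEd a b ≤ pvDistE a b x y := by
  have h1 : pvDist a b x y = pvDist a b a.length b.length := by
    rw [pvDist_clamp_left a b x a.length y hx (le_refl _),
        pvDist_clamp_right a b _ y b.length hy (le_refl _)]
  have h2 := pvDistE_NM a b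
  unfold pvDistE at *
  omega

-- snake lemmas
theorem pvSnake_ge (a b : List Int) (k x : Int) : x ≤ pvSnake a b k x := by
  fun_induction pvSnake with
  | case1 x h ih => omega
  | case2 x h => omega

theorem pvSnake_stop (a b : List Int) (k x : Int) :
    ¬(pvSnake a b k x < (a.length : Int) ∧ pvSnake a b k x - k < (b.length : Int) ∧
      pvSnakeEq a b k (pvSnake a b k x) = true) := by
  fun_induction pvSnake with
  | case1 x h ih => exact ih
  | case2 x h => exact h

theorem pvSnakeEq_char (a b : List Int) (k x : Int) (hx0 : 0 ≤ x) (hx1 : x < (a.length : Int))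
    (hy0 : 0 ≤ x - k) (hy1 : x - k < (b.length : Int)) :
    (pvSnakeEq a b k x = true) ↔ a.getD x.toNat 0 = b.getD (x-k).toNat 0 := by
  unfold pvSnakeEq
  rw [PySem.List.pyGet?_eq_some_getElem a hx0 hx1,
      PySem.List.pyGet?_eq_some_getElem b hy0 hy1]
  dsimp only
  simp only [beq_iff_eq]
  rw [List.getD_eq_getElem a 0 (by omega), List.getD_eq_getElem b 0 (by omega)]

theorem pvSnake_dist (a b : List Int) (k x D : Int) (hx : 0 ≤ x) (hk : k ≤ x)
    (hd : pvDistE a b x (x - k) ≤ D) :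
    pvDistE a b (pvSnake a b k x) (pvSnake a b k x - k) ≤ D := by
  fun_induction pvSnake with
  | case1 x h ih =>
    obtain ⟨hxa, hxb, heq⟩ := h
    have hchar := (pvSnakeEq_char a b k x hx hxa (by omega) hxb).mp heq
    have hsn := pvDistE_snake a b x (x - k) hx hxa (by omega) hxb hchar
    have hxk : x - k + 1 = x + 1 - k := by ring
    rw [hxk] at hsn
    exact ih (by omega) (by omega) (by rw [hsn]; exact hd)
  | case2 x h => exact hd

-- furthest-reaching point on diagonal k after D steps, as the greatest solution
def pvPb (a b : List Int) (D k : Int) (n : Nat) : Bool :=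
  decide (max 0 k ≤ (n : Int) ∧ pvDistE a b (n : Int) ((n : Int) - k) ≤ D)

def pvGfr (a b : List Int) (D k : Int) : Int :=
  (Nat.findGreatest (fun n => pvPb a b D k n = true) (a.length + D.toNat) : Nat)

theorem pvP_base (a b : List Int) (D k : Int) (hD : 0 ≤ D) (h1 : -D ≤ k) (h2 : k ≤ D) :
    pvPb a b D k (max 0 k).toNat = true := by
  unfold pvPb
  rw [decide_eq_true_iff]
  have hN : (0:Int) ≤ a.length := by positivity
  have hM : (0:Int) ≤ b.length := by positivity
  by_cases hk : 0 ≤ k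
  · have h0 : ((max 0 k).toNat : Int) = k := by omega
    rw [h0]
    refine ⟨by omega, ?_⟩
    rw [show k - k = 0 by ring, pvDistE_zero_right a b k hk]
    omega
  · have h0 : ((max 0 k).toNat : Int) = 0 := by omega
    rw [h0]
    refine ⟨by omega, ?_⟩
    rw [show (0:Int) - k = -k by ring, pvDistE_zero_left a b (-k) (by omega)]
    omega

theorem pvGfr_ge (a b : List Int) (D k : Int) (n : Nat) (hp : pvPb a b D k n = true) :
    (n : Int) ≤ pvGfr a b D k := by
  have hp' := hp
  unfold pvPb at hp'
  rw [decide_eq_true_iff] at hp'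
  obtain ⟨hp1, hp2⟩ := hp'
  have hnn := pvDistE_nonneg a b (n : Int) ((n : Int) - k)
  have hD0 : 0 ≤ D := le_trans hnn hp2
  have hpen := pvDistE_ge_pen a b (n : Int) ((n : Int) - k)
  have hb : n ≤ a.length + D.toNat := by omega
  have := Nat.le_findGreatest (P := fun n => pvPb a b D k n = true) hb hp
  unfold pvGfr
  exact_mod_cast this

theorem pvGfr_lb (a b : List Int) (D k : Int) (hD : 0 ≤ D) (h1 : -D ≤ k) (h2 : k ≤ D) :
    max 0 k ≤ pvGfr a b D k := by
  have := pvGfr_ge a b D k (max 0 k).toNat (pvP_base a b D k hD h1 h2)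
  have h0 : (0:Int) ≤ max 0 k := le_max_left _ _
  omega

theorem pvGfr_nonneg (a b : List Int) (D k : Int) : 0 ≤ pvGfr a b D k := by
  unfold pvGfr; positivity

theorem pvGfr_mem (a b : List Int) (D k : Int) (hD : 0 ≤ D) (h1 : -D ≤ k) (h2 : k ≤ D) :
    max 0 k ≤ pvGfr a b D k ∧ pvDistE a b (pvGfr a b D k) (pvGfr a b D k - k) ≤ D := by
  have hbase := pvP_base a b D k hD h1 h2
  have hble : (max 0 k).toNat ≤ a.length + D.toNat := by omega
  have hspec := Nat.findGreatest_spec (P := fun n => pvPb a b D k n = true) hble hbase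
  unfold pvGfr
  set G := Nat.findGreatest (fun n => pvPb a b D k n = true) (a.length + D.toNat) with hG
  have h3 : pvPb a b D k G = true := hspec
  unfold pvPb at h3
  rw [decide_eq_true_iff] at h3
  exact h3

-- the candidate start point of round D, diagonal k (mirrors the Python branch)
def pvCand (a b : List Int) (D k : Int) : Int :=
  if k = -D ∨ (k ≠ D ∧ pvGfr a b (D-1) (k-1) < pvGfr a b (D-1) (k+1))
  then pvGfr a b (D-1) (k+1) else pvGfr a b (D-1) (k-1) + 1

theorem pvGfr_ge' (a b : List Int) (D k z : Int) (h0 : 0 ≤ z) (h1 : max 0 k ≤ z)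
    (h2 : pvDistE a b z (z - k) ≤ D) : z ≤ pvGfr a b D k := by
  have hz : ((z.toNat : Int)) = z := by omega
  have hp : pvPb a b D k z.toNat = true := by
    unfold pvPb; rw [decide_eq_true_iff, hz]; exact ⟨h1, h2⟩
  have := pvGfr_ge a b D k z.toNat hp
  omega

theorem pvFromLeft (a b : List Int) (D k x : Int) (hkD : k ≠ -D)
    (hle : x - 1 ≤ pvGfr a b (D-1) (k-1)) : x ≤ pvCand a b D k := by
  unfold pvCand
  split_ifs with h
  · rcases h with h | ⟨_, h⟩
    · exact absurd h hkD
    · omega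
  · omega

theorem pvFromRight (a b : List Int) (D k x : Int) (hkD : k ≠ D)
    (hle : x ≤ pvGfr a b (D-1) (k+1)) : x ≤ pvCand a b D k := by
  unfold pvCand
  split_ifs with h
  · omega
  · push_neg at h
    have := h.2 hkD
    omega

theorem pvCand_lb (a b : List Int) (D k : Int) (hD : 1 ≤ D) (h1 : -D ≤ k) (h2 : k ≤ D)
    (hpar : 2 ∣ (D - k)) : max 0 k ≤ pvCand a b D k := by
  unfold pvCand
  obtain ⟨e, he⟩ := hpar
  split_ifs with h
  · have hkD : k ≠ D ∧ k + 1 ≤ D - 1 ∧ -(D-1) ≤ k + 1 := by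
      rcases h with h | ⟨h', _⟩
      · constructor
        · omega
        · omega
      · constructor
        · exact h'
        · omega
    have := pvGfr_lb a b (D-1) (k+1) (by omega) (by omega) (by omega)
    omega
  · push_neg at h
    have hk : k ≠ -D := h.1
    have := pvGfr_lb a b (D-1) (k-1) (by omega) (by omega) (by omega)
    omega

theorem pvCand_dist (a b : List Int) (D k : Int) (hD : 1 ≤ D) (h1 : -D ≤ k) (h2 : k ≤ D)
    (hpar : 2 ∣ (D - k)) : pvDistE a b (pvCand a b D k) (pvCand a b D k - k) ≤ D := by
  unfold pvCand
  obtain ⟨e, he⟩ := hpar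
  split_ifs with h
  · have hkD : k + 1 ≤ D - 1 := by
      rcases h with h | ⟨h', _⟩ <;> omega
    obtain ⟨hm1, hm2⟩ := pvGfr_mem a b (D-1) (k+1) (by omega) (by omega) (by omega)
    have hv := pvDistE_v a b (pvGfr a b (D-1) (k+1)) (pvGfr a b (D-1) (k+1) - (k+1)) (by omega)
    have hxk : pvGfr a b (D-1) (k+1) - (k+1) + 1 = pvGfr a b (D-1) (k+1) - k := by ring
    rw [hxk] at hv
    omega
  · push_neg at h
    have hk : k ≠ -D := h.1
    obtain ⟨hm1, hm2⟩ := pvGfr_mem a b (D-1) (k-1) (by omega) (by omega) (by omega)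
    have hh := pvDistE_h a b (pvGfr a b (D-1) (k-1)) (pvGfr a b (D-1) (k-1) - (k-1)) (by omega)
    have hxk : pvGfr a b (D-1) (k-1) - (k-1) = pvGfr a b (D-1) (k-1) + 1 - k := by ring
    rw [hxk] at hh hm2
    omega

theorem pvNbrLeft (a b : List Int) (D k x : Int) (hD : 1 ≤ D) (hx : 1 ≤ x) (hmx : max 0 k < x)
    (hL : pvDistE a b (x-1) (x-k) ≤ D - 1) : x ≤ pvCand a b D k := by
  have hlb := pvDistE_lb a b (x-1) (x-k) (by omega) (by omega)
  have hkD : k ≠ -D := by intro h; omega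
  have e : (x-1) - (k-1) = x - k := by ring
  have hge := pvGfr_ge' a b (D-1) (k-1) (x-1) (by omega) (by omega) (by rw [e]; exact hL)
  exact pvFromLeft a b D k x hkD hge

theorem pvNbrRight (a b : List Int) (D k x : Int) (hD : 1 ≤ D) (hx : 0 ≤ x) (hmx : max 0 k < x)
    (hR : pvDistE a b x (x-k-1) ≤ D - 1) : x ≤ pvCand a b D k := by
  have hlb := pvDistE_lb a b x (x-k-1) (by omega) (by omega)
  have hkD : k ≠ D := by intro h; omega
  have e : x - (k+1) = x - k - 1 := by ring
  have hge := pvGfr_ge' a b (D-1) (k+1) x (by omega) (by omega) (by rw [e]; exact hR)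
  exact pvFromRight a b D k x hkD hge

theorem pvMaxRound (a b : List Int) (D k : Int) (hD : 1 ≤ D) (h1 : -D ≤ k) (h2 : k ≤ D)
    (hpar : 2 ∣ (D - k)) (n : Nat) (hp : pvPb a b D k n = true) :
    (n : Int) ≤ pvSnake a b k (pvCand a b D k) := by
  have hclb : max 0 k ≤ pvCand a b D k := pvCand_lb a b D k hD h1 h2 hpar
  have hsge := pvSnake_ge a b k (pvCand a b D k)
  revert hp
  induction n using Nat.strong_induction_on with
  | _ n ih =>
  intro hp
  unfold pvPb at hp
  rw [decide_eq_true_iff] at hp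
  obtain ⟨hn1, hn2⟩ := hp
  by_cases hnc : (n : Int) ≤ pvCand a b D k
  · omega
  · have hx1 : 1 ≤ (n:Int) := by omega
    by_cases hsnake : ((n:Int) - 1 < (a.length:Int) ∧ ((n:Int)-1) - k < (b.length:Int) ∧
        pvSnakeEq a b k ((n:Int)-1) = true)
    · obtain ⟨ha1, hb1, heq⟩ := hsnake
      have hchar := (pvSnakeEq_char a b k ((n:Int)-1) (by omega) ha1 (by omega) hb1).mp heq
      have hsn := pvDistE_snake a b ((n:Int)-1) ((n:Int)-1-k) (by omega) ha1 (by omega) hb1 hchar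
      have e1 : (n:Int) - 1 + 1 = (n:Int) := by ring
      have e2 : (n:Int) - 1 - k + 1 = (n:Int) - k := by ring
      rw [e1, e2] at hsn
      have hprev : pvPb a b D k (n-1) = true := by
        unfold pvPb
        rw [decide_eq_true_iff]
        have hc : ((n-1 : Nat) : Int) = (n:Int) - 1 := by omega
        rw [hc]
        refine ⟨by omega, ?_⟩
        have e3 : (n:Int) - 1 - k = (n:Int) - 1 - k := rfl
        omega
      have hih := ih (n-1) (by omega) hprev
      have hcast : (((n-1:Nat)):Int) = (n:Int) - 1 := by omega
      rw [hcast] at hih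
      by_cases heq2 : pvSnake a b k (pvCand a b D k) = (n:Int) - 1
      · exfalso
        have hstop := pvSnake_stop a b k (pvCand a b D k)
        rw [heq2] at hstop
        exact hstop ⟨ha1, hb1, heq⟩
      · omega
    · by_cases hA : (n:Int) - 1 < (a.length:Int)
      · by_cases hB : (n:Int) - 1 - k < (b.length:Int)
        · have hC : ¬ (pvSnakeEq a b k ((n:Int)-1) = true) := by tauto
          have hne : a.getD ((n:Int)-1).toNat 0 ≠ b.getD ((n:Int)-1-k).toNat 0 := by
            intro hcontra
            exact hC ((pvSnakeEq_char a b k ((n:Int)-1) (by omega) hA (by omega) hB).mpr hcontra)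
          have e4 : (n:Int) - k - 1 = (n:Int) - 1 - k := by ring
          have hne' : a.getD ((n:Int)-1).toNat 0 ≠ b.getD ((n:Int)-k-1).toNat 0 := by
            rw [e4]; exact hne
          have hneq := pvDistE_neq a b (n:Int) ((n:Int)-k) (by omega) (by omega) (by omega)
            (by omega) hne'
          rcases min_choice (pvDistE a b ((n:Int)-1) ((n:Int)-k)) (pvDistE a b (n:Int) ((n:Int)-k-1))
            with hm | hm
          · have hmin1 := min_le_left (pvDistE a b ((n:Int)-1) ((n:Int)-k)) (pvDistE a b (n:Int) ((n:Int)-k-1))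
            have hL : pvDistE a b ((n:Int)-1) ((n:Int)-k) ≤ D - 1 := by omega
            have := pvNbrLeft a b D k (n:Int) hD (by omega) (by omega) hL
            omega
          · have hmin2 := min_le_right (pvDistE a b ((n:Int)-1) ((n:Int)-k)) (pvDistE a b (n:Int) ((n:Int)-k-1))
            have hR : pvDistE a b (n:Int) ((n:Int)-k-1) ≤ D - 1 := by omega
            have := pvNbrRight a b D k (n:Int) hD (by omega) (by omega) hR
            omega
        · have hvb := pvDistE_vb a b (n:Int) ((n:Int)-k) (by omega) (by omega)
          have hR : pvDistE a b (n:Int) ((n:Int)-k-1) ≤ D - 1 := by omega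
          have := pvNbrRight a b D k (n:Int) hD (by omega) (by omega) hR
          omega
      · have hhb := pvDistE_hb a b (n:Int) ((n:Int)-k) (by omega) (by omega)
        have hL : pvDistE a b ((n:Int)-1) ((n:Int)-k) ≤ D - 1 := by omega
        have := pvNbrLeft a b D k (n:Int) hD (by omega) (by omega) hL
        omega

theorem pvCrux (a b : List Int) (D k : Int) (hD : 1 ≤ D) (h1 : -D ≤ k) (h2 : k ≤ D)
    (hpar : 2 ∣ (D - k)) : pvSnake a b k (pvCand a b D k) = pvGfr a b D k := by
  have hclb := pvCand_lb a b D k hD h1 h2 hpar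
  have hcd := pvCand_dist a b D k hD h1 h2 hpar
  apply le_antisymm
  · have hsd := pvSnake_dist a b k (pvCand a b D k) D (by omega) (by omega) hcd
    have hsge := pvSnake_ge a b k (pvCand a b D k)
    exact pvGfr_ge' a b D k _ (by omega) (by omega) hsd
  · obtain ⟨hm1, hm2⟩ := pvGfr_mem a b D k (by omega) h1 h2
    have hg0 := pvGfr_nonneg a b D k
    have hc : ((pvGfr a b D k).toNat : Int) = pvGfr a b D k := by omega
    have hPn : pvPb a b D k (pvGfr a b D k).toNat = true := by
      unfold pvPb
      rw [decide_eq_true_iff, hc]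
      exact ⟨hm1, hm2⟩
    have := pvMaxRound a b D k hD h1 h2 hpar _ hPn
    omega

theorem pvRound0 (a b : List Int) : pvSnake a b 0 0 = pvGfr a b 0 0 := by
  have h00 : pvDistE a b 0 0 = 0 := by
    have := pvDistE_zero_left a b 0 (by omega)
    simpa using this
  have hsge0 := pvSnake_ge a b 0 0
  apply le_antisymm
  · have hsd := pvSnake_dist a b 0 0 0 (by omega) (by omega) (by simpa using h00.le)
    exact pvGfr_ge' a b 0 0 _ (by omega) (by simpa using hsge0) (by simpa using hsd)
  · suffices hmax : ∀ n : Nat, pvPb a b 0 0 n = true → (n:Int) ≤ pvSnake a b 0 0 by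
      obtain ⟨hm1, hm2⟩ := pvGfr_mem a b 0 0 (by omega) (by omega) (by omega)
      have hg0 := pvGfr_nonneg a b 0 0
      have hc : ((pvGfr a b 0 0).toNat : Int) = pvGfr a b 0 0 := by omega
      have hPn : pvPb a b 0 0 (pvGfr a b 0 0).toNat = true := by
        unfold pvPb
        rw [decide_eq_true_iff, hc]
        exact ⟨hm1, hm2⟩
      have := hmax _ hPn
      omega
    intro n
    induction n using Nat.strong_induction_on with
    | _ n ih =>
    intro hp
    unfold pvPb at hp
    rw [decide_eq_true_iff] at hp
    obtain ⟨hn1, hn2⟩ := hp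
    rw [sub_zero] at hn2
    rcases Nat.eq_zero_or_pos n with h0 | h0
    · subst h0; omega
    · by_cases hsnake : ((n:Int) - 1 < (a.length:Int) ∧ ((n:Int)-1) - 0 < (b.length:Int) ∧
          pvSnakeEq a b 0 ((n:Int)-1) = true)
      · obtain ⟨ha1, hb1, heq⟩ := hsnake
        rw [sub_zero] at hb1
        have hchar := (pvSnakeEq_char a b 0 ((n:Int)-1) (by omega) ha1 (by omega) (by omega)).mp heq
        rw [sub_zero] at hchar
        have hsn := pvDistE_snake a b ((n:Int)-1) ((n:Int)-1) (by omega) ha1 (by omega) hb1 hchar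
        have e1 : (n:Int) - 1 + 1 = (n:Int) := by ring
        rw [e1] at hsn
        have hprev : pvPb a b 0 0 (n-1) = true := by
          unfold pvPb
          rw [decide_eq_true_iff]
          have hc : ((n-1 : Nat) : Int) = (n:Int) - 1 := by omega
          rw [hc, sub_zero]
          exact ⟨by omega, by omega⟩
        have hih := ih (n-1) (by omega) hprev
        have hcast : (((n-1:Nat)):Int) = (n:Int) - 1 := by omega
        rw [hcast] at hih
        by_cases heq2 : pvSnake a b 0 0 = (n:Int) - 1
        · exfalso
          have hstop := pvSnake_stop a b 0 0
          rw [heq2] at hstop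
          exact hstop ⟨ha1, by rw [sub_zero]; exact hb1, heq⟩
        · omega
      · exfalso
        by_cases hA : (n:Int) - 1 < (a.length:Int)
        · by_cases hB : (n:Int) - 1 < (b.length:Int)
          · have hC : ¬ (pvSnakeEq a b 0 ((n:Int)-1) = true) := by
              intro hcontra
              exact hsnake ⟨hA, by rw [sub_zero]; exact hB, hcontra⟩
            have hne : a.getD ((n:Int)-1).toNat 0 ≠ b.getD ((n:Int)-1).toNat 0 := by
              intro hcontra
              exact hC ((pvSnakeEq_char a b 0 ((n:Int)-1) (by omega) hA (by omega)
                (by omega)).mpr (by rw [sub_zero]; exact hcontra))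
            have hne' : a.getD ((n:Int)-1).toNat 0 ≠ b.getD ((n:Int)-0-1).toNat 0 := by
              have e4 : (n:Int) - 0 - 1 = (n:Int) - 1 := by ring
              rw [e4]
              exact hne
            have hneq := pvDistE_neq a b (n:Int) ((n:Int)-0) (by omega) (by omega) (by omega)
              (by omega) hne'
            rw [sub_zero] at hneq
            have hnn1 := pvDistE_nonneg a b ((n:Int)-1) (n:Int)
            have hnn2 := pvDistE_nonneg a b (n:Int) ((n:Int)-1)
            have hm1 := min_choice (pvDistE a b ((n:Int)-1) (n:Int)) (pvDistE a b (n:Int) ((n:Int)-1))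
            omega
          · have hvb := pvDistE_vb a b (n:Int) (n:Int) (by omega) (by omega)
            have hnn := pvDistE_nonneg a b (n:Int) ((n:Int)-1)
            omega
        · have hhb := pvDistE_hb a b (n:Int) (n:Int) (by omega) (by omega)
          have hnn := pvDistE_nonneg a b ((n:Int)-1) (n:Int)
          omega

-- return conditions
theorem pvNoEarly (a b : List Int) (D x y : Int) (hd : pvDistE a b x y ≤ D)
    (hlt : D < pvEd a b) : ¬((a.length : Int) ≤ x ∧ (b.length : Int) ≤ y) := by
  rintro ⟨h1, h2⟩
  have := pvDistE_corner a b x y h1 h2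
  omega

theorem pvTrigger (a b : List Int) (hD : 0 ≤ pvEd a b) :
    (a.length : Int) ≤ pvGfr a b (pvEd a b) ((a.length : Int) - b.length) := by
  have hNM := pvDistE_NM a b
  have hN0 : (0:Int) ≤ (a.length : Int) := by positivity
  have hM0 : (0:Int) ≤ (b.length : Int) := by positivity
  have e : (a.length:Int) - ((a.length:Int) - (b.length:Int)) = (b.length:Int) := by ring
  apply pvGfr_ge' a b (pvEd a b) ((a.length:Int) - (b.length:Int)) (a.length:Int) hN0 (by omega)
  rw [e, hNM]

-- wrapped index bridging (Python negative list indices)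
def pvIdx (len : Nat) (i : Int) : Nat := if 0 ≤ i then i.toNat else len - (-i).toNat

theorem pvGetD_eq (v : List Int) (i : Int) (h1 : -(v.length : Int) ≤ i) (h2 : i < (v.length : Int)) :
    PySem.List.pyGetD v i 0 = v.getD (pvIdx v.length i) 0 := by
  unfold PySem.List.pyGetD PySem.List.pyGet? PySem.List.pyIdx? pvIdx
  by_cases h : 0 ≤ i
  · rw [if_pos h, if_pos (show i < ((v.length:Nat):Int) by omega), if_pos h]
    simp [List.getD_eq_getElem?_getD]
  · rw [if_neg h, if_pos (show -((v.length:Nat):Int) ≤ i by omega), if_neg h]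
    simp [List.getD_eq_getElem?_getD]

theorem pvSetD_eq (v : List Int) (i : Int) (x : Int) (h1 : -(v.length : Int) ≤ i) (h2 : i < (v.length : Int)) :
    PySem.List.pySetD v i x = v.set (pvIdx v.length i) x := by
  unfold PySem.List.pySetD PySem.List.pySet? PySem.List.pyIdx? pvIdx
  by_cases h : 0 ≤ i
  · rw [if_pos h, if_pos (show i < ((v.length:Nat):Int) by omega), if_pos h]
    simp
  · rw [if_neg h, if_pos (show -((v.length:Nat):Int) ≤ i by omega), if_neg h]
    simp

theorem pvIdx_inj (len : Nat) (i j mx : Int) (hlen : (len : Int) = 2 * mx + 2) (hmx : 0 ≤ mx)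
    (hi : -mx ≤ i) (hi2 : i ≤ mx) (hj : -mx ≤ j) (hj2 : j ≤ mx)
    (h : pvIdx len i = pvIdx len j) : i = j := by
  unfold pvIdx at h; split_ifs at h <;> omega

def pvVlen (a b : List Int) : Nat := 2 * (a.length + b.length) + 2

theorem pvGetD_set_self (v : List Int) (m : Nat) (x : Int) (h : m < v.length) :
    (v.set m x).getD m 0 = x := by
  rw [List.getD_eq_getElem?_getD, List.getElem?_set_self h]
  rfl

theorem pvGetD_set_ne (v : List Int) (m n : Nat) (x : Int) (h : m ≠ n) :
    (v.set m x).getD n 0 = v.getD n 0 := by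
  rw [List.getD_eq_getElem?_getD, List.getElem?_set_ne h, ← List.getD_eq_getElem?_getD]

theorem pvRange2_nil (k D : Int) (h : D < k) : PySem.List.pyRange k (D+1) 2 = [] := by
  rw [PySem.List.pyRange_of_pos _ _ (by norm_num), if_neg (by omega)]
  simp

theorem pvRange2_cons (k D : Int) (h : k ≤ D) :
    PySem.List.pyRange k (D+1) 2 = k :: PySem.List.pyRange (k+2) (D+1) 2 := by
  rw [PySem.List.pyRange_of_pos _ _ (by norm_num), PySem.List.pyRange_of_pos _ _ (by norm_num)]
  by_cases h2 : k + 2 < D + 1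
  · rw [if_pos (by omega), if_pos h2]
    have hc : ((D + 1 - k + 2 - 1)/2).toNat = ((D + 1 - (k+2) + 2 - 1)/2).toNat + 1 := by omega
    rw [hc, List.range_succ_eq_map, List.map_cons, List.map_map]
    congr 1
    · omega
    · apply List.map_congr_left
      intro j hj
      simp
      omega
  · rw [if_pos (by omega), if_neg h2]
    have hc : ((D + 1 - k + 2 - 1)/2).toNat = 1 := by omega
    rw [hc]
    simp

theorem pvReadWrite (a b : List Int) (v : List Int) (hlen : v.length = pvVlen a b) (i j x : Int)
    (hi1 : -((a.length:Int)+(b.length:Int)) ≤ i) (hi2 : i ≤ (a.length:Int)+(b.length:Int))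
    (hj1 : -((a.length:Int)+(b.length:Int)) ≤ j) (hj2 : j ≤ (a.length:Int)+(b.length:Int)) :
    PySem.List.pyGetD (PySem.List.pySetD v i x) j 0 =
      if j = i then x else PySem.List.pyGetD v j 0 := by
  have hmx : (0:Int) ≤ (a.length:Int)+(b.length:Int) := by positivity
  have hvl : ((v.length : Nat) : Int) = 2*((a.length:Int)+(b.length:Int))+2 := by
    rw [hlen]; unfold pvVlen; push_cast; ring
  have hset := pvSetD_eq v i x (by omega) (by omega)
  rw [hset]
  have hlen2 : (v.set (pvIdx v.length i) x).length = v.length := by simp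
  have hget := pvGetD_eq (v.set (pvIdx v.length i) x) j
    (by rw [hlen2]; omega) (by rw [hlen2]; omega)
  rw [hlen2] at hget
  rw [hget]
  have hgv := pvGetD_eq v j (by omega) (by omega)
  have hidxlt : pvIdx v.length i < v.length := by unfold pvIdx; split_ifs <;> omega
  by_cases hji : j = i
  · subst hji
    rw [if_pos rfl]
    exact pvGetD_set_self v _ x hidxlt
  · rw [if_neg hji, hgv]
    apply pvGetD_set_ne
    intro he
    exact hji (pvIdx_inj v.length j i ((a.length:Int)+(b.length:Int)) hvl hmx hj1 hj2 hi1 hi2 he.symm)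

-- the V-array invariants
def pvInvPre (a b : List Int) (D : Int) (v : List Int) : Prop :=
  v.length = pvVlen a b ∧
  ∀ j : Int, -(D-1) ≤ j → j ≤ D-1 → 2 ∣ (D - 1 - j) →
    PySem.List.pyGetD v j 0 = pvGfr a b (D-1) j

def pvInvIn (a b : List Int) (D k0 : Int) (v : List Int) : Prop :=
  pvInvPre a b D v ∧
  ∀ j : Int, -D ≤ j → j ≤ k0 - 2 → 2 ∣ (D - j) →
    PySem.List.pyGetD v j 0 = pvGfr a b D j

theorem pvBody_eq (a b : List Int) (D k : Int) (v : List Int) (hD : 1 ≤ D) (hDm : D ≤ (a.length : Int) + b.length)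
    (h1 : -D ≤ k) (h2 : k ≤ D) (hpar : 2 ∣ (D - k)) (hv : pvInvIn a b D k v) :
    pvBody a b D k v = pvGfr a b D k := by
  obtain ⟨⟨hlen, hpre⟩, hin⟩ := hv
  obtain ⟨e, he⟩ := hpar
  unfold pvBody
  by_cases hk1 : k = -D
  · rw [if_pos (Or.inl hk1)]
    have hr := hpre (k+1) (by omega) (by omega) ⟨e - 1, by omega⟩
    rw [hr]
    have hc : pvCand a b D k = pvGfr a b (D-1) (k+1) := by
      unfold pvCand; rw [if_pos (Or.inl hk1)]
    rw [← hc]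
    exact pvCrux a b D k hD h1 h2 ⟨e, he⟩
  · by_cases hk2 : k = D
    · have hcond : ¬(k = -D ∨ (k ≠ D ∧ PySem.List.pyGetD v (k-1) 0 < PySem.List.pyGetD v (k+1) 0)) := by
        push_neg
        exact ⟨hk1, fun h => absurd hk2 (by simp [h])⟩
      rw [if_neg hcond]
      have hr := hpre (k-1) (by omega) (by omega) ⟨e, by omega⟩
      rw [hr]
      have hcond' : ¬(k = -D ∨ (k ≠ D ∧ pvGfr a b (D-1) (k-1) < pvGfr a b (D-1) (k+1))) := by
        push_neg
        exact ⟨hk1, fun h => absurd hk2 (by simp [h])⟩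
      have hc : pvCand a b D k = pvGfr a b (D-1) (k-1) + 1 := by
        unfold pvCand; rw [if_neg hcond']
      rw [← hc]
      exact pvCrux a b D k hD h1 h2 ⟨e, he⟩
    · have hr1 := hpre (k-1) (by omega) (by omega) ⟨e, by omega⟩
      have hr2 := hpre (k+1) (by omega) (by omega) ⟨e - 1, by omega⟩
      rw [hr1, hr2]
      have hc : pvCand a b D k =
          if k = -D ∨ (k ≠ D ∧ pvGfr a b (D-1) (k-1) < pvGfr a b (D-1) (k+1))
          then pvGfr a b (D-1) (k+1) else pvGfr a b (D-1) (k-1) + 1 := rfl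
      rw [← hc]
      exact pvCrux a b D k hD h1 h2 ⟨e, he⟩

theorem pvInvStep (a b : List Int) (D k0 : Int) (v : List Int) (hD : 1 ≤ D)
    (hDm : D ≤ (a.length:Int) + (b.length:Int)) (hk1 : -D ≤ k0) (hk2 : k0 ≤ D)
    (hpar : 2 ∣ (D - k0)) (hv : pvInvIn a b D k0 v) (x : Int) (hx : x = pvGfr a b D k0) :
    pvInvIn a b D (k0+2) (PySem.List.pySetD v k0 x) := by
  obtain ⟨⟨hlen, hpre⟩, hin⟩ := hv
  obtain ⟨e, he⟩ := hpar
  have hmx : (0:Int) ≤ (a.length:Int)+(b.length:Int) := by positivity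
  have hvl : ((v.length : Nat) : Int) = 2*((a.length:Int)+(b.length:Int))+2 := by
    rw [hlen]; unfold pvVlen; push_cast; ring
  have hlen' : (PySem.List.pySetD v k0 x).length = pvVlen a b := by
    rw [pvSetD_eq v k0 x (by omega) (by omega)]
    simp [hlen]
  refine ⟨⟨hlen', ?_⟩, ?_⟩
  · intro j hj1 hj2 hj3
    obtain ⟨f, hf⟩ := hj3
    rw [pvReadWrite a b v hlen k0 j x (by omega) (by omega) (by omega) (by omega)]
    rw [if_neg (by intro hjk; omega)]
    exact hpre j hj1 hj2 ⟨f, hf⟩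
  · intro j hj1 hj2 hj3
    obtain ⟨f, hf⟩ := hj3
    rw [pvReadWrite a b v hlen k0 j x (by omega) (by omega) (by omega) (by omega)]
    by_cases hjk : j = k0
    · rw [if_pos hjk, hx, hjk]
    · rw [if_neg hjk]
      exact hin j hj1 (by omega) ⟨f, hf⟩

theorem pvInner_complete (a b : List Int) (D : Int) (hD : 1 ≤ D) (hDm : D ≤ (a.length : Int) + b.length)
    (hDe : D < pvEd a b) :
    ∀ (fuel : Nat) (k0 : Int) (v : List Int), ((D + 2 - k0).toNat ≤ fuel) → -D ≤ k0 → k0 ≤ D + 2 → 2 ∣ (D - k0) →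
    pvInvIn a b D k0 v →
    ∃ v', pvInner a b D (PySem.List.pyRange k0 (D+1) 2) v = .inl v' ∧ pvInvPre a b (D+1) v' := by
  intro fuel
  induction fuel with
  | zero =>
    intro k0 v hfuel hk1 hk2 hpar hv
    have hk0 : D < k0 := by omega
    rw [pvRange2_nil k0 D hk0]
    refine ⟨v, rfl, hv.1.1, ?_⟩
    intro j hj1 hj2 hj3
    obtain ⟨f, hf⟩ := hj3
    have he : D + 1 - 1 = D := by ring
    rw [he]
    exact hv.2 j (by omega) (by omega) ⟨f, by omega⟩
  | succ fuel ih =>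
    intro k0 v hfuel hk1 hk2 hpar hv
    by_cases hk0 : D < k0
    · rw [pvRange2_nil k0 D hk0]
      refine ⟨v, rfl, hv.1.1, ?_⟩
      intro j hj1 hj2 hj3
      obtain ⟨f, hf⟩ := hj3
      have he : D + 1 - 1 = D := by ring
      rw [he]
      exact hv.2 j (by omega) (by omega) ⟨f, by omega⟩
    · rw [pvRange2_cons k0 D (by omega)]
      simp only [pvInner]
      have hbody := pvBody_eq a b D k0 v hD hDm hk1 (by omega) hpar hv
      rw [hbody]
      obtain ⟨hm1, hm2⟩ := pvGfr_mem a b D k0 (by omega) hk1 (by omega)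
      have hne := pvNoEarly a b D (pvGfr a b D k0) (pvGfr a b D k0 - k0) hm2 hDe
      rw [if_neg hne]
      obtain ⟨e, he⟩ := hpar
      exact ih (k0+2) _ (by omega) (by omega) (by omega) ⟨e - 1, by omega⟩
        (pvInvStep a b D k0 v hD hDm hk1 (by omega) ⟨e, he⟩ hv (pvGfr a b D k0) rfl)

theorem pvInner_return (a b : List Int) (D : Int) (hD : 1 ≤ D) (hDm : D ≤ (a.length : Int) + b.length)
    (hDe : D = pvEd a b) :
    ∀ (fuel : Nat) (k0 : Int) (v : List Int), ((D + 2 - k0).toNat ≤ fuel) → -D ≤ k0 →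
    k0 ≤ (a.length : Int) - b.length → 2 ∣ (D - k0) →
    pvInvIn a b D k0 v →
    pvInner a b D (PySem.List.pyRange k0 (D+1) 2) v = .inr D := by
  intro fuel
  induction fuel with
  | zero =>
    intro k0 v hfuel hk1 hk2 hpar hv
    exfalso
    have hsub := (pvEd_ge_sub a b).1
    omega
  | succ fuel ih =>
    intro k0 v hfuel hk1 hk2 hpar hv
    have hsub := (pvEd_ge_sub a b).1
    rw [pvRange2_cons k0 D (by omega)]
    simp only [pvInner]
    have hbody := pvBody_eq a b D k0 v hD hDm hk1 (by omega) hpar hv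
    rw [hbody]
    by_cases hret : ((a.length:Int) ≤ pvGfr a b D k0 ∧ (b.length:Int) ≤ pvGfr a b D k0 - k0)
    · rw [if_pos hret]
    · rw [if_neg hret]
      have hk0ne : k0 ≠ (a.length:Int) - (b.length:Int) := by
        intro hkk
        have htr := pvTrigger a b (pvEd_nonneg a b)
        rw [← hDe] at htr
        rw [hkk] at hret
        exact hret ⟨by omega, by omega⟩
      obtain ⟨sZ, hs⟩ := pvEd_parity a b
      have hpar2 : 2 ∣ (D - ((a.length:Int) - (b.length:Int))) := ⟨(b.length:Int) - sZ, by omega⟩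
      obtain ⟨e, he⟩ := hpar
      obtain ⟨f, hf⟩ := hpar2
      exact ih (k0+2) _ (by omega) (by omega) (by omega) ⟨e - 1, by omega⟩
        (pvInvStep a b D k0 v hD hDm hk1 (by omega) ⟨e, he⟩ hv (pvGfr a b D k0) rfl)

theorem pvOuter_run (a b : List Int) :
    ∀ (fuel : Nat) (D : Int) (v : List Int), ((pvEd a b - D).toNat ≤ fuel) → 1 ≤ D → D ≤ pvEd a b →
    pvInvPre a b D v →
    pvOuter a b (PySem.List.pyRange D ((a.length : Int) + b.length + 1) 1) v = pvEd a b := by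
  intro fuel
  induction fuel with
  | zero =>
    intro D v hfuel hD1 hDle hpre
    have hDeq : D = pvEd a b := by omega
    have hDm : D ≤ (a.length:Int)+(b.length:Int) := by
      have := pvEd_le_sum a b
      omega
    rw [PySem.List.pyRange_one_cons (show D < (a.length:Int)+(b.length:Int)+1 by omega)]
    simp only [pvOuter]
    have hinner := pvInner_return a b D hD1 hDm hDeq ((D+2+D).toNat) (-D) v (by omega)
      (by omega) (by have := (pvEd_ge_sub a b).2; omega) ⟨D, by ring⟩
      ⟨hpre, by intro j hj1 hj2 hj3; exact absurd hj2 (by omega)⟩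
    rw [hinner]
    show D = pvEd a b
    exact hDeq
  | succ fuel ih =>
    intro D v hfuel hD1 hDle hpre
    have hDm : D ≤ (a.length:Int)+(b.length:Int) := by
      have := pvEd_le_sum a b
      omega
    rw [PySem.List.pyRange_one_cons (show D < (a.length:Int)+(b.length:Int)+1 by omega)]
    simp only [pvOuter]
    by_cases hDeq : D = pvEd a b
    · have hinner := pvInner_return a b D hD1 hDm hDeq ((D+2+D).toNat) (-D) v (by omega)
        (by omega) (by have := (pvEd_ge_sub a b).2; omega) ⟨D, by ring⟩
        ⟨hpre, by intro j hj1 hj2 hj3; exact absurd hj2 (by omega)⟩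
      rw [hinner]
      show D = pvEd a b
      exact hDeq
    · have hDlt : D < pvEd a b := by omega
      obtain ⟨v', hres, hpre'⟩ := pvInner_complete a b D hD1 hDm hDlt ((D+2+D).toNat) (-D) v
        (by omega) (by omega) (by omega) ⟨D, by ring⟩
        ⟨hpre, by intro j hj1 hj2 hj3; exact absurd hj2 (by omega)⟩
      rw [hres]
      exact ih (D+1) v' (by omega) (by omega) (by omega) hpre'

theorem pvA_eq_ed (a b : List Int) : myers_length_of_shortest_edit_script a b = pvEd a b := by
  unfold myers_length_of_shortest_edit_script
  have hN0 : (0:Int) ≤ (a.length:Int) := by positivity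
  have hM0 : (0:Int) ≤ (b.length:Int) := by positivity
  rw [PySem.List.pyRange_one_cons (show (0:Int) < (a.length:Int)+(b.length:Int)+1 by omega)]
  simp only [pvOuter]
  have hks : PySem.List.pyRange (-(0:Int)) ((0:Int)+1) 2 = [0] := by
    rw [show (-(0:Int)) = 0 by norm_num, pvRange2_cons 0 0 (le_refl 0),
      pvRange2_nil (0+2) 0 (by norm_num)]
  rw [hks]
  simp only [pvInner]
  have hlenrep : (List.replicate (2*(a.length+b.length)+2) (0:Int)).length = pvVlen a b := by
    simp [pvVlen]
  have hbody : pvBody a b 0 0 (List.replicate (2*(a.length+b.length)+2) 0) = pvSnake a b 0 0 := by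
    unfold pvBody
    rw [if_pos (Or.inl (show (0:Int) = -0 by norm_num))]
    have hget : PySem.List.pyGetD (List.replicate (2*(a.length+b.length)+2) (0:Int)) (0+1) 0 = 0 := by
      rw [pvGetD_eq _ _ (by simp; omega) (by simp; push_cast; omega)]
      simp [pvIdx, List.getD_eq_getElem?_getD, List.getElem?_replicate]
    rw [hget]
  rw [hbody, pvRound0]
  obtain ⟨hm1, hm2⟩ := pvGfr_mem a b 0 0 (le_refl 0) (by omega) (by omega)
  by_cases h0 : pvEd a b = 0
  · have hsub := pvEd_ge_sub a b
    have hNM : (a.length:Int) = (b.length:Int) := by omega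
    have htr := pvTrigger a b (pvEd_nonneg a b)
    rw [h0, hNM, sub_self] at htr
    rw [if_pos ⟨by omega, by omega⟩]
    show (0:Int) = pvEd a b
    omega
  · have hlt : 0 < pvEd a b := by
      have := pvEd_nonneg a b
      omega
    have hne := pvNoEarly a b 0 (pvGfr a b 0 0) (pvGfr a b 0 0 - 0) hm2 hlt
    rw [if_neg hne]
    simp only [pvInner]
    apply pvOuter_run a b ((pvEd a b - 1).toNat + 1) 1 _ (by omega) (by omega) (by omega)
    constructor
    · rw [pvSetD_eq _ _ _ (by rw [hlenrep]; unfold pvVlen; push_cast; omega)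
        (by rw [hlenrep]; unfold pvVlen; push_cast; omega)]
      simp [pvVlen]
    · intro j hj1 hj2 hj3
      have hj : j = 0 := by omega
      subst hj
      have hrw := pvReadWrite a b (List.replicate (2*(a.length+b.length)+2) 0) hlenrep 0 0
        (pvGfr a b 0 0) (by omega) (by omega) (by omega) (by omega)
      rw [hrw, if_pos rfl, show (1:Int)-1 = 0 by norm_num]

-- B equals the reference edit distance
def pvRowOf (u : List Int) : List Int → List Int
  | [] => [pvEd u []]
  | y :: bs => pvEd u (y :: bs) :: pvRowOf u bs

theorem pvRowOf_head (u b : List Int) : (pvRowOf u b).headD 0 = pvEd u b := by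
  cases b <;> simp [pvRowOf]

theorem pvBaseRow_eq (b : List Int) : pvBaseRow b = pvRowOf [] b := by
  induction b with
  | nil => simp [pvBaseRow, pvRowOf, pvEd]
  | cons y bs ih => simp [pvBaseRow, pvRowOf, ih, pvEd_nil_left]

theorem pvStepRow_eq (x : Int) (u : List Int) : ∀ b : List Int,
    pvStepRow x b (pvRowOf u b) = pvRowOf (x :: u) b := by
  intro b
  induction b with
  | nil =>
    simp only [pvRowOf, pvStepRow, List.map, pvEd_nil_right, List.length_cons]
    push_cast
    ring_nf
  | cons y bs ih =>
    cases bs with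
    | nil =>
      by_cases hxy : x = y
      · subst hxy
        simp only [pvRowOf, pvStepRow, List.map, pvEd_cons_eq, pvEd_nil_right, List.length_cons,
          if_pos rfl]
        push_cast
        rfl
      · simp only [pvRowOf, pvStepRow, List.map, pvEd_cons_ne _ _ hxy, pvEd_nil_right,
          List.length_cons, if_neg hxy]
        push_cast
        rfl
    | cons z bs' =>
      have hsh : pvRowOf u (y :: z :: bs') =
          pvEd u (y :: z :: bs') :: pvEd u (z :: bs') :: pvRowOf u bs' := by
        simp [pvRowOf]
      rw [hsh]
      show (if x = y then pvEd u (z :: bs')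
        else 1 + min (pvEd u (y :: z :: bs'))
          ((pvStepRow x (z :: bs') (pvEd u (z :: bs') :: pvRowOf u bs')).headD 0)) ::
        pvStepRow x (z :: bs') (pvEd u (z :: bs') :: pvRowOf u bs') = pvRowOf (x :: u) (y :: z :: bs')
      have htl : pvStepRow x (z :: bs') (pvEd u (z :: bs') :: pvRowOf u bs') =
          pvRowOf (x :: u) (z :: bs') := by
        have : pvEd u (z :: bs') :: pvRowOf u bs' = pvRowOf u (z :: bs') := by simp [pvRowOf]
        rw [this, ih]
      rw [htl]
      have hhd : (pvRowOf (x :: u) (z :: bs')).headD 0 = pvEd (x :: u) (z :: bs') := by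
        simp [pvRowOf]
      rw [hhd]
      by_cases hxy : x = y
      · subst hxy
        rw [if_pos rfl]
        simp only [pvRowOf]
        rw [pvEd_cons_eq]
      · rw [if_neg hxy]
        simp only [pvRowOf]
        rw [pvEd_cons_ne _ _ hxy]

theorem pvB_eq_ed (a b : List Int) : myers_length_of_shortest_edit_script_alt a b = pvEd a b := by
  unfold myers_length_of_shortest_edit_script_alt
  have h : a.foldr (fun x row => pvStepRow x b row) (pvBaseRow b) = pvRowOf a b := by
    induction a with
    | nil => simpa using pvBaseRow_eq b
    | cons x u ih => simp only [List.foldr_cons, ih, pvStepRow_eq]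
  rw [h, pvRowOf_head]

-- ===== VERDICT (by name: the statement is the Claim_ definition above) =====
theorem myers_length_of_shortest_edit_script_spec : Claim_equal_myers_length_of_shortest_edit_script := by
  intro a b _
  unfold Spec_myers_length_of_shortest_edit_script
  rw [pvA_eq_ed, pvB_eq_ed]
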